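-- pv_equiv track=rewrite | github.com/alpha3002025/daily-codingtest | programmers/sliding-window/lv2-서버-증설-횟수/solution-20260112-1.py | solution
-- ===== SOURCE A (Python) =====
-- def solution(players, m, k):
--     answer = 0
--
--     server_status_cnt = [0] * 24
--
--     for i, player in enumerate(players):
--         required_server_cnt = player // m
--
--         if required_server_cnt > server_status_cnt[i]:
--             to_add = required_server_cnt - server_status_cnt[i]
--             if to_add > 0:
--                 answer += to_add
--
--             end = min(i + k, 24)
--             for j in range(i, end):
--                 server_status_cnt[j] += to_add
--
--     return answer
-- ===== SOURCE B (Python) =====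
-- def solution(players, m, k):
--     # One pass with a difference array: instead of re-adding to every hour of the
--     # window, record the window's end once and keep a running coverage count.
--     answer = 0
--     current = 0
--     diff = [0] * 25
--     for i, player in enumerate(players):
--         current += diff[i]
--         required = player // m
--         if required > current:
--             to_add = required - current
--             answer += to_add
--             end = min(i + k, 24)
--             if end > i:
--                 current += to_add
--                 diff[end] -= to_add
--     return answer
-- ===== Notes on version B (the rewrite author's own statement) =====
-- stated objective: alternative
-- what changed: Replaces the per-player inner loop that adds the new servers to every hour of the 24-hour window with a difference array and a running coverage count updated once per player.
import Mathlib
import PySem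

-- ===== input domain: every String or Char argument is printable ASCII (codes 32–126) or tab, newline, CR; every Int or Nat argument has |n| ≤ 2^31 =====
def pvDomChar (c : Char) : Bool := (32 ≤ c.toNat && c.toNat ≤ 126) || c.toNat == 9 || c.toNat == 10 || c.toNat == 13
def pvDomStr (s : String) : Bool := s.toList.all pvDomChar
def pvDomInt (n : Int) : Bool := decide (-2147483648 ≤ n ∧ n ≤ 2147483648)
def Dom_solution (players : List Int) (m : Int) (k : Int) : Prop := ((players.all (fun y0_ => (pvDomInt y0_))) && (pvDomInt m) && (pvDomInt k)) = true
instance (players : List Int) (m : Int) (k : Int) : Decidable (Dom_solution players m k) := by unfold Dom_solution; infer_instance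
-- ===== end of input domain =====

-- B replaces A's inner loop (adding the new servers to every hour of their window)
-- with a difference array plus a running coverage count, updated once per player.

-- ===== PORT A =====
-- one step of A's outer loop; state = (answer, server_status_cnt); ip = (i, player)
def solStepA (m k : Int) (st : Int × List Int) (ip : Int × Int) : Int × List Int :=
  let required := PySem.Int.floordiv ip.2 m
  let cur := PySem.List.pyGetD st.2 ip.1 0  -- server_status_cnt[i]; in range under Pre_ (i < 24)
  if required > cur then
    let toAdd := required - cur
    let answer := if toAdd > 0 then st.1 + toAdd else st.1
    let e := min (ip.1 + k) 24
    -- for j in range(i, end): server_status_cnt[j] += to_add   (j always in range: 0 ≤ i ≤ j < 24)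
    (answer, (PySem.List.pyRange ip.1 e 1).foldl
      (fun l j => PySem.List.pySetD l j (PySem.List.pyGetD l j 0 + toAdd)) st.2)
  else st

def solution (players : List Int) (m : Int) (k : Int) : Int :=
  ((PySem.List.enumerate players 0).foldl (solStepA m k) (0, List.replicate 24 0)).1

-- ===== PORT B =====
-- one step of B's loop; state = (answer, current, diff); ip = (i, player)
def solStepB (m k : Int) (st : Int × Int × List Int) (ip : Int × Int) : Int × Int × List Int :=
  let current := st.2.1 + PySem.List.pyGetD st.2.2 ip.1 0  -- diff[i]; in range under Pre_
  let required := PySem.Int.floordiv ip.2 m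
  if required > current then
    let toAdd := required - current
    let e := min (ip.1 + k) 24
    if e > ip.1 then
      (st.1 + toAdd, current + toAdd,
        PySem.List.pySetD st.2.2 e (PySem.List.pyGetD st.2.2 e 0 - toAdd))
    else (st.1 + toAdd, current, st.2.2)
  else (st.1, current, st.2.2)

def solution_alt (players : List Int) (m : Int) (k : Int) : Int :=
  ((PySem.List.enumerate players 0).foldl (solStepB m k) (0, 0, List.replicate 25 0)).1

-- ===== PRECONDITION & SPEC =====
-- A raises IndexError (server_status_cnt[i] at i = 24) when len(players) > 24, and
-- ZeroDivisionError when m = 0; Pre_ excludes exactly those inputs.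
def Pre_solution (players : List Int) (m : Int) (k : Int) : Prop :=
  players.length ≤ 24 ∧ m ≠ 0
instance (players : List Int) (m : Int) (k : Int) : Decidable (Pre_solution players m k) := by unfold Pre_solution; infer_instance

def pvWitness_solution : List Int × Int × Int := ([5, 3, 7], 2, 2)

def Spec_solution (players : List Int) (m : Int) (k : Int) (out : Int) : Prop := out = solution_alt players m k
instance (players : List Int) (m : Int) (k : Int) (out : Int) : Decidable (Spec_solution players m k out) := by unfold Spec_solution; infer_instance

-- ===== CLAIM (what is proved, stated in full; the proofs are below) =====
def Claim_equal_solution : Prop := ∀ (players : List Int) (m : Int) (k : Int), Dom_solution players m k → Pre_solution players m k → Spec_solution players m k (solution players m k)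

-- ===== LEMMAS AND PROOFS =====

-- relation between A's state and B's state before processing index i:
-- equal answers, fixed lengths, and A's per-hour count = B's current + pending diff entries
def PvRel (i : Nat) (a : Int × List Int) (b : Int × Int × List Int) : Prop :=
  a.1 = b.1 ∧ a.2.length = 24 ∧ b.2.2.length = 25 ∧
  ∀ j : Nat, i ≤ j → j < 24 →
    a.2.getD j 0 = b.2.1 + ∑ p ∈ Finset.Icc i j, b.2.2.getD p 0

theorem sum_Icc_bot (f : ℕ → ℤ) {i j : ℕ} (h : i ≤ j) :
    ∑ p ∈ Finset.Icc i j, f p = f i + ∑ p ∈ Finset.Icc (i+1) j, f p := by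
  have hs : Finset.Icc i j = insert i (Finset.Icc (i+1) j) := by
    ext p; simp only [Finset.mem_Icc, Finset.mem_insert]; omega
  rw [hs, Finset.sum_insert (by simp only [Finset.mem_Icc]; omega)]

theorem getD_set_int (l : List Int) (n j : Nat) (v : Int) (hn : n < l.length) :
    (l.set n v).getD j 0 = if j = n then v else l.getD j 0 := by
  simp only [List.getD_eq_getElem?_getD, List.getElem?_set]
  by_cases h : n = j
  · subst h; simp [hn]
  · rw [if_neg h, if_neg (fun hh => h hh.symm)]

-- A's inner loop, characterised: length is preserved …
theorem innerLen (toAdd : Int) : ∀ (r : List Int) (l : List Int),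
    (r.foldl (fun l j => PySem.List.pySetD l j (PySem.List.pyGetD l j 0 + toAdd)) l).length
      = l.length := by
  intro r
  induction r with
  | nil => intro l; rfl
  | cons x xs ih =>
      intro l
      simp only [List.foldl_cons, ih, PySem.List.length_pySetD]

-- … and each cell gains toAdd exactly when its index lies in [a, b)
theorem innerGetD (toAdd : Int) : ∀ (n : Nat) (a b : Int) (l : List Int), (b - a).toNat = n →
    0 ≤ a → b ≤ (l.length : Int) → ∀ j : Nat,
    ((PySem.List.pyRange a b 1).foldl
        (fun l j => PySem.List.pySetD l j (PySem.List.pyGetD l j 0 + toAdd)) l).getD j 0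
      = l.getD j 0 + (if a ≤ (j : Int) ∧ (j : Int) < b then toAdd else 0) := by
  intro n
  induction n with
  | zero =>
      intro a b l hn ha hb j
      rw [PySem.List.pyRange_one_eq_nil (by omega)]
      simp only [List.foldl_nil]
      rw [if_neg (by omega)]; ring
  | succ n ih =>
      intro a b l hn ha hb j
      rw [PySem.List.pyRange_one_cons (by omega)]
      simp only [List.foldl_cons]
      have hset : PySem.List.pySetD l a (PySem.List.pyGetD l a 0 + toAdd)
          = l.set a.toNat (l.getD a.toNat 0 + toAdd) := by
        rw [PySem.List.pySetD_of_nonneg _ _ ha, PySem.List.pyGetD_of_nonneg _ _ ha]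
      rw [hset]
      rw [ih (a+1) b _ (by omega) (by omega) (by simpa using hb) j]
      rw [getD_set_int _ _ _ _ (by omega)]
      by_cases hja : j = a.toNat
      · subst hja
        rw [if_pos rfl, if_neg (by omega), if_pos (by constructor <;> omega)]
        ring
      · rw [if_neg hja]
        have heq : ((a + 1 ≤ (j:Int) ∧ (j:Int) < b)) ↔ ((a ≤ (j:Int) ∧ (j:Int) < b)) := by omega
        simp only [heq]

-- one synchronised step preserves PvRel
theorem step_rel (m k : Int) (i : Nat) (x : Int) (a : Int × List Int) (b : Int × Int × List Int)
    (hi : i < 24) (h : PvRel i a b) :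
    PvRel (i+1) (solStepA m k a ((i : Int), x)) (solStepB m k b ((i : Int), x)) := by
  obtain ⟨ansA, scnt⟩ := a
  obtain ⟨ansB, cur, diff⟩ := b
  obtain ⟨hans, hlenA, hlenB, hinv⟩ := h
  have hans' : ansA = ansB := hans
  have hlenA' : scnt.length = 24 := hlenA
  have hlenB' : diff.length = 25 := hlenB
  have hinv' : ∀ j : Nat, i ≤ j → j < 24 →
      scnt.getD j 0 = cur + ∑ p ∈ Finset.Icc i j, diff.getD p 0 := hinv
  have hcur : scnt.getD i 0 = cur + diff.getD i 0 := by
    simpa [Finset.Icc_self] using hinv' i le_rfl hi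
  -- A's value at any later hour, seen from B's updated running count
  have hshift : ∀ j : Nat, i+1 ≤ j → j < 24 →
      scnt.getD j 0 = (cur + diff.getD i 0) + ∑ p ∈ Finset.Icc (i+1) j, diff.getD p 0 := by
    intro j hj hj24
    rw [hinv' j (by omega) hj24, sum_Icc_bot _ (by omega : i ≤ j)]
    ring
  simp only [solStepA, solStepB, PySem.List.pyGetD_natCast]
  by_cases hgt : PySem.Int.floordiv x m > scnt.getD i 0
  · rw [if_pos hgt, if_pos (show PySem.Int.floordiv x m > cur + diff.getD i 0 by omega)]
    by_cases he : min ((i:Int) + k) 24 > (i:Int)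
    · rw [if_pos he]
      have he24 : min ((i:Int) + k) 24 ≤ 24 := min_le_right _ _
      have he0 : (0:Int) ≤ min ((i:Int) + k) 24 := by omega
      refine ⟨?_, ?_, ?_, ?_⟩
      · show (if _ > (0:Int) then ansA + _ else ansA) = ansB + _
        rw [if_pos (by omega)]
        omega
      · show (List.foldl _ scnt _).length = 24
        rw [innerLen, hlenA']
      · show (PySem.List.pySetD diff _ _).length = 25
        rw [PySem.List.length_pySetD, hlenB']
      · intro j hj hj24
        show (List.foldl _ scnt _).getD j 0 = _
        rw [innerGetD _ ((min ((i:Int) + k) 24 - i).toNat) i _ scnt rfl (by omega)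
          (by rw [hlenA']; exact_mod_cast he24) j]
        have hsetB : PySem.List.pySetD diff (min ((i:Int) + k) 24)
            (PySem.List.pyGetD diff (min ((i:Int) + k) 24) 0
              - (PySem.Int.floordiv x m - (cur + diff.getD i 0)))
            = diff.set (min ((i:Int) + k) 24).toNat
              (diff.getD (min ((i:Int) + k) 24).toNat 0
                - (PySem.Int.floordiv x m - (cur + diff.getD i 0))) := by
          rw [PySem.List.pySetD_of_nonneg _ _ he0, PySem.List.pyGetD_of_nonneg _ _ he0]
        show _ = (cur + diff.getD i 0 + _) + ∑ p ∈ Finset.Icc (i+1) j, (PySem.List.pySetD diff _ _).getD p 0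
        rw [hsetB]
        have hsum : ∑ p ∈ Finset.Icc (i+1) j,
            (diff.set (min ((i:Int) + k) 24).toNat
              (diff.getD (min ((i:Int) + k) 24).toNat 0
                - (PySem.Int.floordiv x m - (cur + diff.getD i 0)))).getD p 0
            = (∑ p ∈ Finset.Icc (i+1) j, diff.getD p 0)
              + (if (min ((i:Int) + k) 24).toNat ∈ Finset.Icc (i+1) j
                  then -(PySem.Int.floordiv x m - (cur + diff.getD i 0)) else 0) := by
          calc ∑ p ∈ Finset.Icc (i+1) j,
                (diff.set (min ((i:Int) + k) 24).toNat
                  (diff.getD (min ((i:Int) + k) 24).toNat 0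
                    - (PySem.Int.floordiv x m - (cur + diff.getD i 0)))).getD p 0
              = ∑ p ∈ Finset.Icc (i+1) j, (diff.getD p 0
                  + (if p = (min ((i:Int) + k) 24).toNat
                      then -(PySem.Int.floordiv x m - (cur + diff.getD i 0)) else 0)) :=
                Finset.sum_congr rfl (fun p _ => by
                  rw [getD_set_int _ _ _ _ (by omega)]
                  split_ifs with hp
                  · rw [hp]; ring
                  · ring)
            _ = _ := by rw [Finset.sum_add_distrib, Finset.sum_ite_eq']
        rw [hsum, hshift j hj hj24]
        simp only [Finset.mem_Icc]
        split_ifs <;> omega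
      
    · rw [if_neg he]
      rw [PySem.List.pyRange_one_eq_nil (by omega)]
      refine ⟨?_, hlenA', hlenB', ?_⟩
      · show (if _ > (0:Int) then ansA + _ else ansA) = ansB + _
        rw [if_pos (by omega)]
        omega
      · intro j hj hj24
        exact hshift j hj hj24
  · rw [if_neg hgt, if_neg (show ¬ PySem.Int.floordiv x m > cur + diff.getD i 0 by omega)]
    exact ⟨hans', hlenA', hlenB', fun j hj hj24 => hshift j hj hj24⟩

-- folding the remaining players keeps the answers equal
theorem fold_rel (m k : Int) : ∀ (ps : List Int) (i : Nat) (a : Int × List Int)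
    (b : Int × Int × List Int), PvRel i a b → i + ps.length ≤ 24 →
    ((PySem.List.enumerate ps (i : Int)).foldl (solStepA m k) a).1
      = ((PySem.List.enumerate ps (i : Int)).foldl (solStepB m k) b).1 := by
  intro ps
  induction ps with
  | nil => intro i a b h _; simpa [PySem.List.enumerate_nil] using h.1
  | cons x xs ih =>
      intro i a b h hle
      rw [PySem.List.enumerate_cons]
      simp only [List.foldl_cons]
      have hcast : (i : Int) + 1 = ((i + 1 : Nat) : Int) := by push_cast; ring
      rw [hcast]
      exact ih (i+1) _ _ (step_rel m k i x a b (by simp at hle; omega) h)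
        (by simp at hle ⊢; omega)

-- ===== VERDICT (by name: the statement is the Claim_ definition above) =====
theorem solution_spec : Claim_equal_solution := by
  intro players m k _ hpre
  unfold Spec_solution solution solution_alt
  have h0 : (0 : Int) = ((0 : Nat) : Int) := rfl
  rw [h0]
  exact fold_rel m k players 0 _ _
    (by
      refine ⟨rfl, by simp, by simp, ?_⟩
      intro j _ hj
      show (List.replicate 24 (0:Int)).getD j 0
          = 0 + ∑ p ∈ Finset.Icc 0 j, (List.replicate 25 (0:Int)).getD p 0
      have hrep : ∀ (n p : Nat), p < n → (List.replicate n (0:Int)).getD p 0 = 0 := by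
        intro n p h
        rw [List.getD_eq_getElem?_getD, List.getElem?_replicate, if_pos h]
        rfl
      rw [hrep 24 j hj,
        Finset.sum_congr rfl (fun p hp => hrep 25 p
          (by simp only [Finset.mem_Icc] at hp; omega)),
        Finset.sum_const_zero]
      exact (zero_add 0).symm)
    (by simpa using hpre.1)
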